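-- pv_equiv track=rewrite | github.com/chrismukwala/kimpa_voice_harnest | harness/edit_applier.py | _candidate_fuzzy_starts
-- ===== SOURCE A (Python) =====
-- def _candidate_fuzzy_starts(content_lines: list[str], search_lines: list[str]) -> list[int]:
--     """Return plausible fuzzy-match windows using first/last-line hints."""
--     n = len(search_lines)
--     max_start = len(content_lines) - n
--     if max_start < 0:
--         return []
--
--     first_hint = search_lines[0].strip()
--     last_hint = search_lines[-1].strip()
--     candidates = []
--
--     for i in range(max_start + 1):
--         first_line = content_lines[i].strip()
--         last_line = content_lines[i + n - 1].strip()
--         if first_hint and first_hint == first_line: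
--             candidates.append(i)
--         elif last_hint and last_hint == last_line:
--             candidates.append(i)
--
--     if candidates:
--         return candidates
--     return list(range(max_start + 1))
-- ===== SOURCE B (Python) =====
-- def _candidate_fuzzy_starts(content_lines: list[str], search_lines: list[str]) -> list[int]:
--     """Return plausible fuzzy-match windows using first/last-line hints."""
--     n = len(search_lines)
--     max_start = len(content_lines) - n
--     if max_start < 0:
--         return []
--
--     positions = {}
--     for idx, line in enumerate(content_lines):
--         positions.setdefault(line.strip(), []).append(idx)
--
--     first_hint = search_lines[0].strip()
--     last_hint = search_lines[-1].strip()
--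
--     starts = set()
--     if first_hint:
--         for i in positions.get(first_hint, []):
--             if i <= max_start:
--                 starts.add(i)
--     if last_hint:
--         for j in positions.get(last_hint, []):
--             s = j - n + 1
--             if 0 <= s <= max_start:
--                 starts.add(s)
--
--     if starts:
--         return sorted(starts)
--     return list(range(max_start + 1))
-- ===== Notes on version B (the rewrite author's own statement) =====
-- stated objective: alternative
-- what changed: B replaces A's window scan that strips and compares two content lines per start with a one-pass index (stripped line -> positions) plus set-union of candidate starts derived by lookup of the two hints, returned sorted.
import Mathlib
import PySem

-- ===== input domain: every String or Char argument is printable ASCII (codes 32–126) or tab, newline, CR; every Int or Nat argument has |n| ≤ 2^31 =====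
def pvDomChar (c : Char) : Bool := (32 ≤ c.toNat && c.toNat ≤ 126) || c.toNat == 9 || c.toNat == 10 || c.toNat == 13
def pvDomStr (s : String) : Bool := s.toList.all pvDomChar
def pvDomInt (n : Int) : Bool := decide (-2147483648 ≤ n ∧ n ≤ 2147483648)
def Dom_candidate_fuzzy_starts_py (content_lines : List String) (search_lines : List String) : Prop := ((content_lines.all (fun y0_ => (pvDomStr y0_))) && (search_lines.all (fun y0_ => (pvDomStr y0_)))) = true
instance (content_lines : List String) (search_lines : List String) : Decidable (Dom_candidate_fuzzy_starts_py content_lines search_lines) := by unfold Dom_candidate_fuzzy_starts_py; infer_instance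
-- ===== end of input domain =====

-- B builds a stripped-line -> positions index once and derives candidate starts by hint lookup
-- into a set, returned sorted; equivalence of the RETURN value with A's window scan is proved.

-- ===== PORT A =====
def candidate_fuzzy_starts_py (content_lines : List String) (search_lines : List String) : List Int :=
  let n : Int := search_lines.length
  let max_start : Int := (content_lines.length : Int) - n
  if max_start < 0 then []
  else
    let first_hint := PySem.Str.strip (PySem.List.pyGetD search_lines 0 "")
    let last_hint := PySem.Str.strip (PySem.List.pyGetD search_lines (-1) "")
    let candidates := (PySem.List.pyRange 0 (max_start + 1) 1).foldl (fun acc i =>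
      let first_line := PySem.Str.strip (PySem.List.pyGetD content_lines i "")
      let last_line := PySem.Str.strip (PySem.List.pyGetD content_lines (i + n - 1) "")
      if first_hint ≠ "" ∧ first_hint = first_line then acc ++ [i]
      else if last_hint ≠ "" ∧ last_hint = last_line then acc ++ [i]
      else acc) []
    if candidates ≠ [] then candidates
    else PySem.List.pyRange 0 (max_start + 1) 1

-- ===== PORT B =====
def candidate_fuzzy_starts_py_alt (content_lines : List String) (search_lines : List String) : List Int :=
  let n : Int := search_lines.length
  let max_start : Int := (content_lines.length : Int) - n
  if max_start < 0 then []
  else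
    -- positions.setdefault(line.strip(), []).append(idx) ported exactly as Dict.modify with default []
    let positions : PySem.Dict String (List Int) :=
      (PySem.List.enumerate content_lines 0).foldl
        (fun d p => d.modify (PySem.Str.strip p.2) [] (fun l => l ++ [p.1])) PySem.Dict.empty
    let first_hint := PySem.Str.strip (PySem.List.pyGetD search_lines 0 "")
    let last_hint := PySem.Str.strip (PySem.List.pyGetD search_lines (-1) "")
    let starts0 : PySem.Set Int :=
      if first_hint ≠ "" then
        (positions.getD first_hint []).foldl
          (fun s i => if i ≤ max_start then PySem.Set.add s i else s) PySem.Set.empty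
      else PySem.Set.empty
    let starts : PySem.Set Int :=
      if last_hint ≠ "" then
        (positions.getD last_hint []).foldl
          (fun s j => if 0 ≤ j - n + 1 ∧ j - n + 1 ≤ max_start then PySem.Set.add s (j - n + 1) else s) starts0
      else starts0
    if starts ≠ [] then PySem.List.sorted starts (fun x => x) false
    else PySem.List.pyRange 0 (max_start + 1) 1

-- ===== PRECONDITION & SPEC =====
-- Python A raises IndexError (search_lines[0]) exactly when search_lines is empty; excluded.
def Pre_candidate_fuzzy_starts_py (content_lines : List String) (search_lines : List String) : Prop :=
  search_lines ≠ []
instance (content_lines : List String) (search_lines : List String) : Decidable (Pre_candidate_fuzzy_starts_py content_lines search_lines) := by unfold Pre_candidate_fuzzy_starts_py; infer_instance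
def pvWitness_candidate_fuzzy_starts_py : List String × List String := (["a", "b"], ["a"])

def Spec_candidate_fuzzy_starts_py (content_lines : List String) (search_lines : List String) (out : List Int) : Prop := out = candidate_fuzzy_starts_py_alt content_lines search_lines
instance (content_lines : List String) (search_lines : List String) (out : List Int) : Decidable (Spec_candidate_fuzzy_starts_py content_lines search_lines out) := by unfold Spec_candidate_fuzzy_starts_py; infer_instance

-- ===== CLAIM (what is proved, stated in full; the proofs are below) =====
def Claim_equal_candidate_fuzzy_starts_py : Prop := ∀ (content_lines : List String) (search_lines : List String), Dom_candidate_fuzzy_starts_py content_lines search_lines → Pre_candidate_fuzzy_starts_py content_lines search_lines → Spec_candidate_fuzzy_starts_py content_lines search_lines (candidate_fuzzy_starts_py content_lines search_lines)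

-- ===== LEMMAS AND PROOFS =====

theorem pv_positions_getD (ps : List (Int × String)) (d : PySem.Dict String (List Int)) (s : String) :
    (ps.foldl (fun d p => d.modify (PySem.Str.strip p.2) [] (fun l => l ++ [p.1])) d).getD s []
      = d.getD s [] ++ ((ps.filter (fun p => PySem.Str.strip p.2 == s)).map (fun p => p.1)) := by
  induction ps generalizing d with
  | nil => simp
  | cons p ps ih =>
    rw [List.foldl_cons, ih, PySem.Dict.getD_modify, List.filter_cons]
    by_cases h : s = PySem.Str.strip p.2
    · simp [h, List.append_assoc]
    · have h' : (PySem.Str.strip p.2 == s) = false := by simp [Ne.symm h]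
      simp [h, h']

theorem pv_mem_foldl_add (q : Int → Prop) [DecidablePred q] (g : Int → Int)
    (L : List Int) (s0 : PySem.Set Int) (y : Int) :
    (y ∈ L.foldl (fun s i => if q i then PySem.Set.add s (g i) else s) s0) ↔
      (y ∈ s0 ∨ ∃ i ∈ L, q i ∧ y = g i) := by
  induction L generalizing s0 with
  | nil => simp
  | cons a L ih =>
    rw [List.foldl_cons]
    by_cases h : q a
    · rw [if_pos h, ih]
      simp only [PySem.Set.mem_add, List.mem_cons]
      constructor
      · rintro ((hy | hy) | ⟨i, hi, hq, hy⟩)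
        exacts [Or.inl hy, Or.inr ⟨a, Or.inl rfl, h, hy⟩, Or.inr ⟨i, Or.inr hi, hq, hy⟩]
      · rintro (hy | ⟨i, hi | hi, hq, hy⟩)
        · exact Or.inl (Or.inl hy)
        · subst hi; exact Or.inl (Or.inr hy)
        · exact Or.inr ⟨i, hi, hq, hy⟩
    · rw [if_neg h, ih]
      simp only [List.mem_cons]
      constructor
      · rintro (hy | ⟨i, hi, hq, hy⟩)
        exacts [Or.inl hy, Or.inr ⟨i, Or.inr hi, hq, hy⟩]
      · rintro (hy | ⟨i, hi | hi, hq, hy⟩)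
        · exact Or.inl hy
        · subst hi; exact absurd hq h
        · exact Or.inr ⟨i, hi, hq, hy⟩

theorem pv_nodup_foldl_add (q : Int → Prop) [DecidablePred q] (g : Int → Int)
    (L : List Int) (s0 : PySem.Set Int) (h : s0.Nodup) :
    (L.foldl (fun s i => if q i then PySem.Set.add s (g i) else s) s0).Nodup := by
  induction L generalizing s0 with
  | nil => exact h
  | cons a L ih =>
    rw [List.foldl_cons]
    by_cases hq : q a
    · rw [if_pos hq]; exact ih _ (PySem.Set.nodup_add _ _ h)
    · rw [if_neg hq]; exact ih _ h

theorem pv_pos_mem (cl : List String) (s : String) (x : Int) :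
    x ∈ ((PySem.List.enumerate cl 0).foldl
        (fun d p => d.modify (PySem.Str.strip p.2) [] (fun l => l ++ [p.1]))
        PySem.Dict.empty).getD s []
    ↔ ∃ k : Nat, k < cl.length ∧ PySem.Str.strip cl[k]! = s ∧ x = (k : Int) := by
  rw [pv_positions_getD, PySem.Dict.getD_empty, List.nil_append, List.mem_map]
  constructor
  · rintro ⟨p, hp, rfl⟩
    rw [List.mem_filter] at hp
    obtain ⟨hpmem, hps⟩ := hp
    rw [PySem.List.mem_enumerate_iff] at hpmem
    obtain ⟨k, hk, rfl⟩ := hpmem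
    refine ⟨k, hk, ?_, by simp⟩
    have h := of_decide_eq_true (by simpa using hps)
    rw [getElem!_pos cl k hk]
    exact h
  · rintro ⟨k, hk, hs, rfl⟩
    refine ⟨((k : Int), cl[k]), ?_, rfl⟩
    rw [List.mem_filter]
    refine ⟨(PySem.List.mem_enumerate_iff cl 0 _).2 ⟨k, hk, by simp⟩, ?_⟩
    rw [getElem!_pos cl k hk] at hs
    simpa using hs

theorem pv_branch (cl : List String) (n ms : Int) (fh lh : String)
    (hn : 1 ≤ n) (hms : ms = (cl.length : Int) - n) (hms0 : 0 ≤ ms) :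
    (if ((PySem.List.pyRange 0 (ms + 1) 1).foldl (fun acc i =>
          if fh ≠ "" ∧ fh = PySem.Str.strip (PySem.List.pyGetD cl i "") then acc ++ [i]
          else if lh ≠ "" ∧ lh = PySem.Str.strip (PySem.List.pyGetD cl (i + n - 1) "") then acc ++ [i]
          else acc) []) ≠ [] then
        ((PySem.List.pyRange 0 (ms + 1) 1).foldl (fun acc i =>
          if fh ≠ "" ∧ fh = PySem.Str.strip (PySem.List.pyGetD cl i "") then acc ++ [i]
          else if lh ≠ "" ∧ lh = PySem.Str.strip (PySem.List.pyGetD cl (i + n - 1) "") then acc ++ [i]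
          else acc) [])
      else PySem.List.pyRange 0 (ms + 1) 1)
    =
    (if (if lh ≠ "" then
          (((PySem.List.enumerate cl 0).foldl
            (fun d p => d.modify (PySem.Str.strip p.2) [] (fun l => l ++ [p.1]))
            PySem.Dict.empty).getD lh []).foldl
            (fun s j => if 0 ≤ j - n + 1 ∧ j - n + 1 ≤ ms then PySem.Set.add s (j - n + 1) else s)
            (if fh ≠ "" then
              (((PySem.List.enumerate cl 0).foldl
                (fun d p => d.modify (PySem.Str.strip p.2) [] (fun l => l ++ [p.1]))
                PySem.Dict.empty).getD fh []).foldl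
                (fun s i => if i ≤ ms then PySem.Set.add s i else s) PySem.Set.empty
            else PySem.Set.empty)
        else
          (if fh ≠ "" then
            (((PySem.List.enumerate cl 0).foldl
              (fun d p => d.modify (PySem.Str.strip p.2) [] (fun l => l ++ [p.1]))
              PySem.Dict.empty).getD fh []).foldl
              (fun s i => if i ≤ ms then PySem.Set.add s i else s) PySem.Set.empty
          else PySem.Set.empty)) ≠ [] then
        PySem.List.sorted (if lh ≠ "" then
          (((PySem.List.enumerate cl 0).foldl
            (fun d p => d.modify (PySem.Str.strip p.2) [] (fun l => l ++ [p.1]))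
            PySem.Dict.empty).getD lh []).foldl
            (fun s j => if 0 ≤ j - n + 1 ∧ j - n + 1 ≤ ms then PySem.Set.add s (j - n + 1) else s)
            (if fh ≠ "" then
              (((PySem.List.enumerate cl 0).foldl
                (fun d p => d.modify (PySem.Str.strip p.2) [] (fun l => l ++ [p.1]))
                PySem.Dict.empty).getD fh []).foldl
                (fun s i => if i ≤ ms then PySem.Set.add s i else s) PySem.Set.empty
            else PySem.Set.empty)
        else
          (if fh ≠ "" then
            (((PySem.List.enumerate cl 0).foldl
              (fun d p => d.modify (PySem.Str.strip p.2) [] (fun l => l ++ [p.1]))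
              PySem.Dict.empty).getD fh []).foldl
              (fun s i => if i ≤ ms then PySem.Set.add s i else s) PySem.Set.empty
          else PySem.Set.empty)) (fun x => x) false
      else PySem.List.pyRange 0 (ms + 1) 1) := by
  have hmslen : ms < (cl.length : Int) := by omega
  -- A's loop is a filter
  have hstep : (fun (acc : List Int) (i : Int) =>
      if fh ≠ "" ∧ fh = PySem.Str.strip (PySem.List.pyGetD cl i "") then acc ++ [i]
      else if lh ≠ "" ∧ lh = PySem.Str.strip (PySem.List.pyGetD cl (i + n - 1) "") then acc ++ [i]
      else acc)
      = (fun acc i => if (fh ≠ "" ∧ fh = PySem.Str.strip (PySem.List.pyGetD cl i "")) ∨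
          (lh ≠ "" ∧ lh = PySem.Str.strip (PySem.List.pyGetD cl (i + n - 1) "")) then acc ++ [i] else acc) := by
    funext acc i
    by_cases h1 : fh ≠ "" ∧ fh = PySem.Str.strip (PySem.List.pyGetD cl i "")
    · rw [if_pos h1, if_pos (Or.inl h1)]
    · by_cases h2 : lh ≠ "" ∧ lh = PySem.Str.strip (PySem.List.pyGetD cl (i + n - 1) "")
      · rw [if_neg h1, if_pos h2, if_pos (Or.inr h2)]
      · rw [if_neg h1, if_neg h2, if_neg (fun hp => hp.elim h1 h2)]
  rw [hstep, PySem.List.foldl_append_ite_eq_filter _ (PySem.List.pyRange 0 (ms + 1) 1) [],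
      List.nil_append]
  set F := (PySem.List.pyRange 0 (ms + 1) 1).filter
      (fun i => decide ((fh ≠ "" ∧ fh = PySem.Str.strip (PySem.List.pyGetD cl i "")) ∨
        (lh ≠ "" ∧ lh = PySem.Str.strip (PySem.List.pyGetD cl (i + n - 1) "")))) with hF
  set d := (PySem.List.enumerate cl 0).foldl
      (fun d p => d.modify (PySem.Str.strip p.2) [] (fun l => l ++ [p.1]))
      PySem.Dict.empty with hd
  set S0 := (if fh ≠ "" then
      (d.getD fh []).foldl (fun s i => if i ≤ ms then PySem.Set.add s i else s) PySem.Set.empty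
    else PySem.Set.empty) with hS0
  set S := (if lh ≠ "" then
      (d.getD lh []).foldl
        (fun s j => if 0 ≤ j - n + 1 ∧ j - n + 1 ≤ ms then PySem.Set.add s (j - n + 1) else s) S0
    else S0) with hS
  -- membership of the candidate set
  have hs0mem : ∀ y : Int, (y ∈ S0) ↔
      (fh ≠ "" ∧ ∃ k : Nat, k < cl.length ∧ PySem.Str.strip cl[k]! = fh ∧ (k : Int) ≤ ms ∧ y = (k : Int)) := by
    intro y
    rw [hS0]
    by_cases hfne : fh ≠ ""
    · rw [if_pos hfne, pv_mem_foldl_add (fun i => i ≤ ms) (fun i => i)]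
      simp only [PySem.Set.empty, List.not_mem_nil, false_or]
      constructor
      · rintro ⟨i, hi, hle, rfl⟩
        rw [hd, pv_pos_mem] at hi
        obtain ⟨k, hk, hsk, rfl⟩ := hi
        exact ⟨hfne, k, hk, hsk, hle, rfl⟩
      · rintro ⟨-, k, hk, hsk, hle, rfl⟩
        exact ⟨(k : Int), by rw [hd, pv_pos_mem]; exact ⟨k, hk, hsk, rfl⟩, hle, rfl⟩
    · rw [if_neg hfne]
      simp [PySem.Set.empty, hfne]
  have hsmem : ∀ y : Int, y ∈ S ↔ ((0 ≤ y ∧ y < ms + 1) ∧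
      ((fh ≠ "" ∧ fh = PySem.Str.strip (PySem.List.pyGetD cl y "")) ∨
       (lh ≠ "" ∧ lh = PySem.Str.strip (PySem.List.pyGetD cl (y + n - 1) "")))) := by
    intro y
    have hmemiff : y ∈ S ↔
        ((fh ≠ "" ∧ ∃ k : Nat, k < cl.length ∧ PySem.Str.strip cl[k]! = fh ∧ (k : Int) ≤ ms ∧ y = (k : Int)) ∨
         (lh ≠ "" ∧ ∃ k : Nat, k < cl.length ∧ PySem.Str.strip cl[k]! = lh ∧
            (0 ≤ (k : Int) - n + 1 ∧ (k : Int) - n + 1 ≤ ms) ∧ y = (k : Int) - n + 1)) := by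
      rw [hS]
      by_cases hlne : lh ≠ ""
      · rw [if_pos hlne,
            pv_mem_foldl_add (fun j => 0 ≤ j - n + 1 ∧ j - n + 1 ≤ ms) (fun j => j - n + 1)]
        rw [hs0mem]
        constructor
        · rintro (h | ⟨j, hj, hq, rfl⟩)
          · exact Or.inl h
          · rw [hd, pv_pos_mem] at hj
            obtain ⟨k, hk, hsk, rfl⟩ := hj
            exact Or.inr ⟨hlne, k, hk, hsk, hq, rfl⟩
        · rintro (h | ⟨-, k, hk, hsk, hq, rfl⟩)
          · exact Or.inl h
          · exact Or.inr ⟨(k : Int), by rw [hd, pv_pos_mem]; exact ⟨k, hk, hsk, rfl⟩, hq, rfl⟩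
      · rw [if_neg hlne, hs0mem]
        simp [hlne]
    rw [hmemiff]
    constructor
    · rintro (⟨hfne, k, hk, hsk, hle, rfl⟩ | ⟨hlne, k, hk, hsk, ⟨hq0, hq1⟩, rfl⟩)
      · have hcast : (k : Int) < (cl.length : Int) := by exact_mod_cast hk
        refine ⟨⟨Int.natCast_nonneg k, by omega⟩, Or.inl ⟨hfne, ?_⟩⟩
        rw [PySem.List.pyGetD_eq_getElem cl "" (Int.natCast_nonneg k) hcast, ← hsk,
            getElem!_pos cl k hk]
        simp
      · refine ⟨⟨hq0, by omega⟩, Or.inr ⟨hlne, ?_⟩⟩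
        have harg : (k : Int) - n + 1 + n - 1 = (k : Int) := by ring
        have hcast : (k : Int) < (cl.length : Int) := by exact_mod_cast hk
        rw [harg, PySem.List.pyGetD_eq_getElem cl "" (Int.natCast_nonneg k) hcast, ← hsk,
            getElem!_pos cl k hk]
        simp
    · rintro ⟨⟨hy0, hy1⟩, (⟨hfne, hfe⟩ | ⟨hlne, hle⟩)⟩
      · left
        refine ⟨hfne, y.toNat, by omega, ?_, by omega, by omega⟩
        have hylt : y < (cl.length : Int) := by omega
        rw [PySem.List.pyGetD_eq_getElem cl "" hy0 hylt] at hfe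
        rw [getElem!_pos cl y.toNat (by omega)]
        exact hfe.symm
      · right
        refine ⟨hlne, (y + n - 1).toNat, by omega, ?_, ⟨by omega, by omega⟩, by omega⟩
        have h1 : 0 ≤ y + n - 1 := by omega
        have h2 : y + n - 1 < (cl.length : Int) := by omega
        rw [PySem.List.pyGetD_eq_getElem cl "" h1 h2] at hle
        rw [getElem!_pos cl (y + n - 1).toNat (by omega)]
        exact hle.symm
  -- nodup of the candidate set
  have hsnodup : S.Nodup := by
    have hbase : S0.Nodup := by
      rw [hS0]
      by_cases hfne : fh ≠ ""
      · rw [if_pos hfne]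
        exact pv_nodup_foldl_add (fun i => i ≤ ms) (fun i => i) _ _ List.nodup_nil
      · rw [if_neg hfne]; exact List.nodup_nil
    rw [hS]
    by_cases hlne : lh ≠ ""
    · rw [if_pos hlne]
      exact pv_nodup_foldl_add _ _ _ _ hbase
    · rw [if_neg hlne]; exact hbase
  -- F facts
  have hFmem : ∀ y : Int, y ∈ F ↔ ((0 ≤ y ∧ y < ms + 1) ∧
      ((fh ≠ "" ∧ fh = PySem.Str.strip (PySem.List.pyGetD cl y "")) ∨
       (lh ≠ "" ∧ lh = PySem.Str.strip (PySem.List.pyGetD cl (y + n - 1) "")))) := by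
    intro y
    rw [hF, List.mem_filter, PySem.List.mem_pyRange_one]
    simp only [decide_eq_true_eq]
  have hFnodup : F.Nodup := (PySem.List.nodup_pyRange_one 0 (ms + 1)).filter _
  have hiff : ∀ y, y ∈ S ↔ y ∈ F := by
    intro y; rw [hsmem, hFmem]
  by_cases hFnil : F = []
  · have hsnil : S = [] := by
      rw [List.eq_nil_iff_forall_not_mem]
      intro y hy
      rw [hiff, hFnil] at hy
      exact List.not_mem_nil hy
    simp [hFnil, hsnil]
  · have hsnil : S ≠ [] := by
      intro hcon
      apply hFnil
      rw [List.eq_nil_iff_forall_not_mem]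
      intro y hy
      rw [← hiff, hcon] at hy
      exact List.not_mem_nil hy
    rw [if_pos hFnil, if_pos hsnil]
    refine (PySem.List.sorted_eq_of_perm_of_pairwise_lt S F (fun x => x) ?_ ?_).symm
    · exact (List.perm_ext_iff_of_nodup hFnodup hsnodup).2 (fun a => (hiff a).symm)
    · exact ((PySem.List.pairwise_lt_pyRange_one 0 (ms + 1)).filter _)

theorem pv_main (cl sl : List String) (hpre : sl ≠ []) :
    candidate_fuzzy_starts_py cl sl = candidate_fuzzy_starts_py_alt cl sl := by
  have hn : 1 ≤ (sl.length : Int) := by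
    have h1 : sl.length ≠ 0 := by simpa [List.length_eq_zero_iff] using hpre
    exact_mod_cast Nat.one_le_iff_ne_zero.mpr h1
  unfold candidate_fuzzy_starts_py candidate_fuzzy_starts_py_alt
  by_cases h0 : ((cl.length : Int) - (sl.length : Int)) < 0
  · simp [h0]
  · simp only [if_neg h0]
    exact pv_branch cl (sl.length : Int) ((cl.length : Int) - (sl.length : Int))
      (PySem.Str.strip (PySem.List.pyGetD sl 0 ""))
      (PySem.Str.strip (PySem.List.pyGetD sl (-1) ""))
      hn rfl (by omega)

-- ===== VERDICT (by name: the statement is the Claim_ definition above) =====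
theorem candidate_fuzzy_starts_py_spec : Claim_equal_candidate_fuzzy_starts_py := by
  intro content_lines search_lines _ hpre
  exact pv_main content_lines search_lines hpre
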